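-- pv_equiv track=rewrite | github.com/Oyekunle-Mark/sherlock-codes | queue_to_do.py | solution
-- ===== SOURCE A (Python) =====
-- def solution(start, length):
--     """Generates the checksum of a matrix of size length X length
--     by first dropping every number after column (row number - 1)
--     from the end of each row and XORing the remaining numbers.
--
--     Arguments:
--         start {int} -- the number to begin with
--         length {int} -- the size of the row and column
--
--     Returns:
--         int -- The generated checksum
--     """
--     # WHAT!
--     # Starts from the number start
--     # begins to leave out one number from the end
--     # from the second row onward
--     # returns the XOR of the remaining number
--
--     # HOW!
--     # initialize checksum to zero
--     checksum = 0
--     # set cutoff to zero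
--     cutoff = 0
--     # set index to length minus one
--     index = length - 1
--     # max to the sum of start and square of length
--     max = start + (length * length)
--
--     # while start is less than max
--     while start < max:
--         # if index is equivalent to cutoff
--         if index == cutoff:
--             # set checksum to the XOR of start
--             checksum ^= start
--             # increment start by cutoff
--             start += cutoff
--             # increment cutoff
--             cutoff += 1
--             # reset index to length minus one
--             index = length - 1
--         # otherwise
--         else:
--             # set checksum to the XOR of start
--             checksum ^= start
--             # decrement index
--             index -= 1
--         # increment start
--         start += 1
--
--     # return checksum
--     return checksum
-- ===== SOURCE B (Python) =====
-- def _pxor(n):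
--     """XOR of 0..n for n >= 0 (0 if n < 0), by the period-4 closed form."""
--     if n < 0:
--         return 0
--     r = n % 4
--     if r == 0:
--         return n
--     if r == 1:
--         return 1
--     if r == 2:
--         return n + 1
--     return 0
--
--
-- def _h(x):
--     """XOR of range(0, x) if x >= 0, else XOR of range(x, 0)."""
--     if x >= 0:
--         return _pxor(x - 1)
--     t = _pxor(-x - 1)
--     return t if x % 2 == 0 else ~t
--
--
-- def _xor_range(a, b):
--     """XOR of range(a, b)."""
--     if a >= b:
--         return 0
--     return _h(a) ^ _h(b)
--
--
-- def solution(start, length):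
--     # XOR of the whole block of length*length consecutive numbers, then
--     # XOR out the numbers the triangular truncation drops (the last c
--     # numbers before the start of row c+1, for c = 1 .. length-1).
--     checksum = _xor_range(start, start + length * length)
--     for c in range(1, length):
--         checksum ^= _xor_range(start + (c + 1) * length - c, start + (c + 1) * length)
--     return checksum
-- ===== Notes on version B (the rewrite author's own statement) =====
-- stated objective: faster
-- what changed: A walks every cell of the triangular-truncated matrix one at a time with an index/cutoff state machine; B computes the checksum arithmetically as the XOR of the whole block of length*length consecutive integers via the period-4 prefix-XOR closed form, then XORs back out one closed-form range per row (the numbers the truncation drops), so it does O(length) constant-size XOR operations instead of O(length^2).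
import Mathlib
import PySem

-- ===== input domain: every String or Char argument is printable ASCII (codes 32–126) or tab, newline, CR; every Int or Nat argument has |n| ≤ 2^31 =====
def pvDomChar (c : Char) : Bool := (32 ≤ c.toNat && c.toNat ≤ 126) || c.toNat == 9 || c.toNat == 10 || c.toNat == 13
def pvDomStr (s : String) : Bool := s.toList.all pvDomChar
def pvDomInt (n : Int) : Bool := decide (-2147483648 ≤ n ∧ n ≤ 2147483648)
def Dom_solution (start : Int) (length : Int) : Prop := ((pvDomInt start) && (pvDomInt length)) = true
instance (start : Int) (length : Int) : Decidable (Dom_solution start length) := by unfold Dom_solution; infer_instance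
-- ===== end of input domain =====

-- B replaces A's per-element while loop by O(length) arithmetic: XOR of the whole
-- consecutive block via the period-4 prefix-XOR closed form, then XOR-ing out the
-- numbers the triangular truncation skips, one closed-form range per row (faster).

-- ===== PORT A =====
-- A's while loop; `cutoff` starts at 0 and is only ever incremented, so it is a
-- Nat counter (cast to Int for the `index == cutoff` comparison).
def solutionLoop (max : Int) (length : Int) (checksum : Int) (cutoff : Nat)
    (index : Int) (start : Int) : Int :=
  if _h : start < max then
    if index = (cutoff : Int) then
      solutionLoop max length (PySem.Int.bxor checksum start) (cutoff + 1)
        (length - 1) (start + cutoff + 1)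
    else
      solutionLoop max length (PySem.Int.bxor checksum start) cutoff
        (index - 1) (start + 1)
  else
    checksum
termination_by (max - start).toNat
decreasing_by all_goals omega

def solution (start : Int) (length : Int) : Int :=
  solutionLoop (start + length * length) length 0 0 (length - 1) start

-- ===== PORT B =====
-- XOR of 0..n for n >= 0 (0 if n < 0), by the period-4 closed form.
def pxor (n : Int) : Int :=
  if n < 0 then 0
  else
    let r := PySem.Int.mod n 4
    if r = 0 then n
    else if r = 1 then 1
    else if r = 2 then n + 1
    else 0

-- XOR of range(0, x) if x >= 0, else XOR of range(x, 0).
def hAux (x : Int) : Int :=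
  if 0 ≤ x then pxor (x - 1)
  else
    let t := pxor (-x - 1)
    if PySem.Int.mod x 2 = 0 then t else Int.not t

-- XOR of range(a, b).
def xorRange (a b : Int) : Int :=
  if a ≥ b then 0 else PySem.Int.bxor (hAux a) (hAux b)

def solution_alt (start : Int) (length : Int) : Int :=
  (PySem.List.pyRange 1 length 1).foldl
    (fun checksum c =>
      PySem.Int.bxor checksum
        (xorRange (start + (c + 1) * length - c) (start + (c + 1) * length)))
    (xorRange start (start + length * length))

-- ===== PRECONDITION & SPEC =====
def Spec_solution (start : Int) (length : Int) (out : Int) : Prop := out = solution_alt start length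
instance (start : Int) (length : Int) (out : Int) : Decidable (Spec_solution start length out) := by unfold Spec_solution; infer_instance

-- ===== CLAIM (what is proved, stated in full; the proofs are below) =====
def Claim_equal_solution : Prop := ∀ (start : Int) (length : Int), Dom_solution start length → Spec_solution start length (solution start length)

-- ===== LEMMAS AND PROOFS =====

-- PySem's Python-exact `^` agrees with core `Int.xor`.
theorem bxor_eq_xor (a b : Int) : PySem.Int.bxor a b = Int.xor a b := by
  cases a <;> cases b <;> simp [PySem.Int.bxor, Int.xor] <;> omega

theorem ixor_zero (a : Int) : Int.xor a 0 = a := by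
  cases a <;> simp [Int.xor]

theorem ixor_zero_left (a : Int) : Int.xor 0 a = a := by
  cases a <;> simp [Int.xor]

theorem ixor_self (a : Int) : Int.xor a a = 0 := by
  cases a <;> simp [Int.xor]

theorem ixor_comm (a b : Int) : Int.xor a b = Int.xor b a := by
  cases a <;> cases b <;> simp [Int.xor, Nat.xor_comm]

theorem ixor_assoc (a b c : Int) : Int.xor (Int.xor a b) c = Int.xor a (Int.xor b c) := by
  cases a <;> cases b <;> cases c <;> simp [Int.xor, Nat.xor_assoc]

theorem ixor_cancel_left (a b : Int) : Int.xor a (Int.xor a b) = b := by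
  rw [← ixor_assoc, ixor_self, ixor_zero_left]

theorem ixor_not (a b : Int) : Int.xor a (Int.not b) = Int.not (Int.xor a b) := by
  cases a <;> cases b <;> simp [Int.xor, Int.not]

theorem inot_not (a : Int) : Int.not (Int.not a) = a := by
  cases a <;> simp [Int.not]

theorem inot_eq (a : Int) : Int.not a = -a - 1 := by
  cases a <;> simp [Int.not, Int.negSucc_eq] <;> ring

theorem ixor_natCast (x y : Nat) : Int.xor (x : Int) (y : Int) = ((x ^^^ y : Nat) : Int) := rfl

-- Reference spine: XOR of the n consecutive integers a, a+1, ..., a+n-1.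
def xrN (a : Int) : Nat → Int
  | 0 => 0
  | n + 1 => Int.xor a (xrN (a + 1) n)

theorem xrN_snoc (n : Nat) : ∀ a : Int, xrN a (n + 1) = Int.xor (xrN a n) (a + n) := by
  induction n with
  | zero => intro a; simp [xrN, ixor_zero, ixor_zero_left]
  | succ n ih =>
    intro a
    have h1 : xrN a (n + 1 + 1) = Int.xor a (xrN (a + 1) (n + 1)) := rfl
    rw [h1, ih, ← ixor_assoc]
    have h2 : xrN a (n + 1) = Int.xor a (xrN (a + 1) n) := rfl
    rw [h2]
    push_cast
    ring_nf

theorem xrN_append (m n : Nat) (a : Int) :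
    xrN a (m + n) = Int.xor (xrN a m) (xrN (a + m) n) := by
  induction n with
  | zero => simp [xrN, ixor_zero]
  | succ n ih =>
    have h : m + (n + 1) = (m + n) + 1 := by omega
    rw [h, xrN_snoc, ih, xrN_snoc, ixor_assoc]
    push_cast
    ring_nf

-- XOR of a range of integers, reflected through x -> -x-1 (Python ~): the same
-- values complemented, so the XOR is preserved up to parity of the length.
theorem xrN_reflect (n : Nat) : ∀ a : Int,
    xrN a n = if n % 2 = 0 then xrN (-a - n) n else Int.not (xrN (-a - n) n) := by
  induction n with
  | zero => intro a; simp [xrN]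
  | succ n ih =>
    intro a
    have hL : xrN a (n + 1) = Int.xor a (xrN (a + 1) n) := rfl
    have hR : xrN (-a - (n + 1 : Nat)) (n + 1) =
        Int.xor (xrN (-a - (n + 1 : Nat)) n) (-a - 1) := by
      rw [xrN_snoc]; congr 1; push_cast; ring
    have hs : -(a + 1) - (n : Int) = -a - ((n : Nat) + 1 : Nat) := by push_cast; ring
    rcases Nat.even_or_odd n with he | ho
    · have h2 : n % 2 = 0 := Nat.even_iff.mp he
      have h3 : (n + 1) % 2 ≠ 0 := by omega
      rw [hL, ih (a + 1), if_pos h2, hs, if_neg h3, hR]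
      have hna : (-a - 1 : Int) = Int.not a := by rw [inot_eq]
      rw [hna, ixor_not, inot_not, ixor_comm]
    · have h2 : n % 2 ≠ 0 := by have := Nat.odd_iff.mp ho; omega
      have h3 : (n + 1) % 2 = 0 := by omega
      rw [hL, ih (a + 1), if_neg h2, hs, if_pos h3, hR]
      have hna : (-a - 1 : Int) = Int.not a := by rw [inot_eq]
      rw [hna, ixor_not, ixor_not, ixor_comm]

theorem xrN_zero_natCast (n : Nat) :
    xrN 0 n = ((List.range n).foldl (fun x y => x ^^^ y) 0 : Nat) := by
  induction n with
  | zero => simp [xrN]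
  | succ n ih =>
    rw [xrN_snoc, ih, List.range_succ, List.foldl_append, zero_add, ixor_natCast]
    simp

-- The period-4 closed form is the prefix XOR (via Mathlib's Nat.xor_range).
theorem pxor_spec (n : Int) (h : -1 ≤ n) : pxor n = xrN 0 (n + 1).toNat := by
  rcases lt_or_ge n 0 with hn | hn
  · have h1 : n = -1 := by omega
    subst h1
    simp [pxor, xrN]
  · obtain ⟨m, rfl⟩ := Int.eq_ofNat_of_zero_le hn
    have ht : ((m : Int) + 1).toNat = m + 1 := by omega
    rw [ht, xrN_zero_natCast, Nat.xor_range]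
    have hmod : PySem.Int.mod (m : Int) 4 = ((m % 4 : Nat) : Int) := by
      exact_mod_cast PySem.Int.mod_natCast m 4
    have h4 : m % 4 = 0 ∨ m % 4 = 1 ∨ m % 4 = 2 ∨ m % 4 = 3 := by omega
    rcases h4 with hm | hm | hm | hm <;>
      simp [pxor, hmod, hm, Fin.ofNat, not_lt.mpr hn] <;> omega

theorem hAux_spec (x : Int) :
    hAux x = if 0 ≤ x then xrN 0 x.toNat else xrN x (-x).toNat := by
  unfold hAux
  by_cases hx : 0 ≤ x
  · rw [if_pos hx, if_pos hx, pxor_spec (x - 1) (by omega)]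
    congr 1; omega
  · rw [if_neg hx, if_neg hx]
    have ht : (-x - 1 + 1).toNat = (-x).toNat := by omega
    rw [pxor_spec (-x - 1) (by omega), ht, xrN_reflect ((-x).toNat) x]
    have h0 : -x - (((-x).toNat : Nat) : Int) = 0 := by omega
    rw [h0]
    by_cases hm : PySem.Int.mod x 2 = 0
    · have h2 : (2 : Int) ∣ x := (PySem.Int.mod_eq_zero_iff_dvd x 2).mp hm
      have he : (-x).toNat % 2 = 0 := by omega
      rw [if_pos hm, if_pos he]
    · have h2 : ¬ (2 : Int) ∣ x := fun hd => hm ((PySem.Int.mod_eq_zero_iff_dvd x 2).mpr hd)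
      have he : ¬ (-x).toNat % 2 = 0 := by omega
      rw [if_neg hm, if_neg he]

theorem xorRange_spec (a b : Int) (h : a ≤ b) : xorRange a b = xrN a (b - a).toNat := by
  unfold xorRange
  by_cases hab : a ≥ b
  · have h0 : b - a = 0 := by omega
    rw [if_pos hab, h0]
    simp [xrN]
  · rw [if_neg hab, bxor_eq_xor, hAux_spec, hAux_spec]
    by_cases ha : 0 ≤ a
    · have hb : 0 ≤ b := by omega
      rw [if_pos ha, if_pos hb]
      have hsplit : b.toNat = a.toNat + (b - a).toNat := by omega
      rw [hsplit, xrN_append]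
      have h0 : (0 : Int) + (a.toNat : Int) = a := by omega
      rw [h0, ixor_cancel_left]
    · by_cases hb : 0 ≤ b
      · rw [if_neg ha, if_pos hb]
        have hsplit : (b - a).toNat = (-a).toNat + b.toNat := by omega
        rw [hsplit, xrN_append]
        have h0 : a + ((-a).toNat : Int) = 0 := by omega
        rw [h0]
      · rw [if_neg ha, if_neg hb]
        have hsplit : (-a).toNat = (b - a).toNat + (-b).toNat := by omega
        rw [hsplit, xrN_append]
        have h0 : a + (((b - a).toNat : Nat) : Int) = b := by omega
        rw [h0, ixor_assoc, ixor_self, ixor_zero]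

-- A's loop when index < cutoff (once behind, the if-branch never fires): a straight run.
theorem loop_else (fuel : Nat) : ∀ (max L ch : Int) (c : Nat) (i s : Int),
    (max - s).toNat = fuel → i < (c : Int) →
    solutionLoop max L ch c i s = Int.xor ch (xrN s (max - s).toNat) := by
  induction fuel with
  | zero =>
    intro max L ch c i s hf hi
    rw [solutionLoop, dif_neg (by omega), hf]
    rw [show xrN s 0 = 0 from rfl, ixor_zero]
  | succ n ih =>
    intro max L ch c i s hf hi
    have hsm : s < max := by omega
    rw [solutionLoop, dif_pos hsm, if_neg (by omega),
      ih max L _ c (i - 1) (s + 1) (by omega) (by omega)]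
    have h1 : (max - s).toNat = (max - (s + 1)).toNat + 1 := by omega
    rw [h1, show xrN s ((max - (s + 1)).toNat + 1)
        = Int.xor s (xrN (s + 1) (max - (s + 1)).toNat) from rfl,
      bxor_eq_xor, ixor_assoc]

-- One full row of A's loop: XORs s..s+(i-c), then jumps to the next row start.
theorem loop_row (n : Nat) : ∀ (max L ch : Int) (c : Nat) (i s : Int),
    (i - (c : Int)).toNat = n → (c : Int) ≤ i → s + (i - (c : Int)) < max →
    solutionLoop max L ch c i s =
      solutionLoop max L (Int.xor ch (xrN s ((i - (c : Int)).toNat + 1))) (c + 1)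
        (L - 1) (s + (i - (c : Int)) + (c : Int) + 1) := by
  induction n with
  | zero =>
    intro max L ch c i s hn hci hmax
    have hic : i = (c : Int) := by omega
    have hsm : s < max := by omega
    rw [solutionLoop, dif_pos hsm, if_pos hic, hn]
    rw [show xrN s 1 = Int.xor s (xrN (s + 1) 0) from rfl,
      show xrN (s + 1) 0 = 0 from rfl, ixor_zero, bxor_eq_xor]
    have harg : s + (i - (c : Int)) + (c : Int) + 1 = s + (c : Int) + 1 := by omega
    rw [harg]
  | succ n ih =>
    intro max L ch c i s hn hci hmax
    have hsm : s < max := by omega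
    rw [solutionLoop, dif_pos hsm, if_neg (by omega),
      ih max L _ c (i - 1) (s + 1) (by omega) (by omega) (by omega)]
    have h1 : (i - (c : Int)).toNat = (i - 1 - (c : Int)).toNat + 1 := by omega
    have h2 : s + 1 + (i - 1 - (c : Int)) + (c : Int) + 1
        = s + (i - (c : Int)) + (c : Int) + 1 := by omega
    rw [h1, h2, show xrN s ((i - 1 - (c : Int)).toNat + 1 + 1)
        = Int.xor s (xrN (s + 1) ((i - 1 - (c : Int)).toNat + 1)) from rfl,
      bxor_eq_xor, ixor_assoc]

-- XOR of the rows A keeps, from cutoff value c on: row c is the L-c numbers from s.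
def rowsXor (s c L : Int) : Int :=
  if c < L then Int.xor (xrN s (L - c).toNat) (rowsXor (s + L) (c + 1) L) else 0
termination_by (L - c).toNat
decreasing_by omega

theorem loop_rows (k : Nat) : ∀ (L ch : Int) (c : Nat) (s : Int),
    (c : Int) + k = L →
    solutionLoop (s + k * L) L ch c (L - 1) s = Int.xor ch (rowsXor s (c : Int) L) := by
  induction k with
  | zero =>
    intro L ch c s hc
    rw [solutionLoop, dif_neg (by push_cast; omega), rowsXor, if_neg (by omega), ixor_zero]
  | succ k ih =>
    intro L ch c s hc
    have hcL : (c : Int) < L := by push_cast at hc ⊢; omega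
    have hL1 : 1 ≤ L := by have : (0 : Int) ≤ c := by positivity
                           omega
    have hkL : (0 : Int) ≤ (k : Int) * (L - 1) := mul_nonneg (by positivity) (by omega)
    have e1 : ((k : Int) + 1) * L = (k : Int) * (L - 1) + (k : Int) + L := by ring
    rw [loop_row (L - 1 - (c : Int)).toNat (s + ((k : Nat) + 1 : Nat) * L) L ch c (L - 1) s
        rfl (by omega) (by push_cast; omega)]
    have h2 : s + (L - 1 - (c : Int)) + (c : Int) + 1 = s + L := by ring
    have h3 : s + (((k : Nat) + 1 : Nat) : Int) * L = s + L + (k : Int) * L := by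
      push_cast; ring
    rw [h2, h3, ih L _ (c + 1) (s + L) (by push_cast; omega)]
    conv_rhs => rw [rowsXor]
    have h4 : (L - (c : Int)).toNat = (L - 1 - (c : Int)).toNat + 1 := by omega
    have h5 : ((c + 1 : Nat) : Int) = (c : Int) + 1 := by push_cast; ring
    rw [if_pos hcL, h4, h5, ixor_assoc]

-- XOR of the closed-form skip ranges B removes, for loop counters c, c+1, ..., L-1.
def skipsX (s c L : Int) : Int :=
  if c < L then
    Int.xor (xorRange (s + (c + 1) * L - c) (s + (c + 1) * L)) (skipsX s (c + 1) L)
  else 0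
termination_by (L - c).toNat
decreasing_by omega

theorem fold_skips (k : Nat) : ∀ (s L acc c : Int), (L - c).toNat = k →
    (PySem.List.pyRange c L 1).foldl
      (fun checksum x =>
        PySem.Int.bxor checksum
          (xorRange (s + (x + 1) * L - x) (s + (x + 1) * L))) acc
      = Int.xor acc (skipsX s c L) := by
  induction k with
  | zero =>
    intro s L acc c hk
    have hcL : L ≤ c := by omega
    rw [show PySem.List.pyRange c L 1 = [] from by simp [pysem, hcL]]
    rw [skipsX, if_neg (by omega), List.foldl_nil, ixor_zero]
  | succ k ih =>
    intro s L acc c hk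
    have hcL : c < L := by omega
    rw [show PySem.List.pyRange c L 1 = c :: PySem.List.pyRange (c + 1) L 1 from
        PySem.List.pyRange_one_cons hcL]
    rw [List.foldl_cons, ih s L _ (c + 1) (by omega)]
    conv_rhs => rw [skipsX]
    rw [if_pos hcL, bxor_eq_xor, ixor_assoc]

-- The block [s0+cL, s0+(c+1)L) is row c followed by the c skipped numbers; XOR-ing
-- the skips back out of the full block leaves exactly the rows A keeps.
theorem rows_decompose (k : Nat) : ∀ (s c L : Int), 0 ≤ c → (k : Int) = L - c →
    rowsXor (s + c * L) c L =
      Int.xor (xrN (s + c * L) ((k : Int) * L).toNat) (skipsX s c L) := by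
  induction k with
  | zero =>
    intro s c L hc hk
    rw [rowsXor, if_neg (by omega), skipsX, if_neg (by omega)]
    rw [show ((0 : Nat) : Int) * L = 0 from by push_cast; ring]
    rw [show xrN (s + c * L) ((0 : Int)).toNat = 0 from rfl, ixor_zero]
  | succ k ih =>
    intro s c L hc hk
    have hcL : c < L := by push_cast at hk; omega
    have hL1 : 1 ≤ L := by omega
    rw [rowsXor, if_pos hcL, skipsX, if_pos hcL]
    have harg : s + c * L + L = s + (c + 1) * L := by ring
    rw [harg, ih s (c + 1) L (by omega) (by push_cast at hk ⊢; omega)]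
    -- widths, all nonneg
    have hknn : (0 : Int) ≤ (k : Int) := by positivity
    have hkLnn : (0 : Int) ≤ (k : Int) * L := mul_nonneg hknn (by omega)
    -- split the full block [s+cL, s+(c+1+k)L) at s+(c+1)L, and the first block at its row end
    have hsplit1 : (((k : Nat) + 1 : Nat) : Int) * L = L + (k : Int) * L := by push_cast; ring
    have htn1 : ((L + (k : Int) * L)).toNat = L.toNat + ((k : Int) * L).toNat := by omega
    have hb1 : xrN (s + c * L) (L + (k : Int) * L).toNat
        = Int.xor (xrN (s + c * L) L.toNat) (xrN (s + (c + 1) * L) ((k : Int) * L).toNat) := by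
      rw [htn1, xrN_append]
      congr 2
      omega
    have htn2 : L.toNat = (L - c).toNat + c.toNat := by omega
    have hb2 : xrN (s + c * L) L.toNat
        = Int.xor (xrN (s + c * L) (L - c).toNat) (xrN (s + (c + 1) * L - c) c.toNat) := by
      rw [htn2, xrN_append]
      congr 2
      omega
    have hskip : xorRange (s + (c + 1) * L - c) (s + (c + 1) * L)
        = xrN (s + (c + 1) * L - c) c.toNat := by
      rw [xorRange_spec _ _ (by omega)]
      congr 1
      omega
    rw [hsplit1, hb1, hb2, hskip]
    -- pure XOR algebra: ((R^S)^T)^(S^U) = R^(T^U)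
    generalize xrN (s + c * L) (L - c).toNat = R
    generalize xrN (s + (c + 1) * L - c) c.toNat = S
    generalize xrN (s + (c + 1) * L) ((k : Int) * L).toNat = T
    generalize skipsX s (c + 1) L = U
    rw [ixor_assoc R S, ixor_assoc R]
    rw [show Int.xor (Int.xor S T) (Int.xor S U) = Int.xor T U from by
      rw [ixor_comm S T, ixor_assoc, ixor_cancel_left]]

-- ===== VERDICT (by name: the statement is the Claim_ definition above) =====
theorem solution_spec : Claim_equal_solution := by
  unfold Claim_equal_solution Spec_solution
  intro s L _
  unfold solution solution_alt
  have hLsq : (0 : Int) ≤ L * L := mul_self_nonneg L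
  rcases lt_trichotomy L 0 with hL | hL | hL
  · -- negative length: index < cutoff from the start, A XORs the whole block
    rw [loop_else (s + L * L - s).toNat (s + L * L) L 0 0 (L - 1) s rfl (by omega)]
    rw [show PySem.List.pyRange 1 L 1 = [] from by
      simp [pysem, show L ≤ (1 : Int) from by omega]]
    rw [List.foldl_nil, xorRange_spec s (s + L * L) (by omega), ixor_zero_left]
  · -- length 0: no iterations, empty range
    subst hL
    rw [solutionLoop, dif_neg (by omega)]
    rw [show PySem.List.pyRange 1 0 1 = [] from by
      simp [pysem, show (0 : Int) ≤ 1 from by omega]]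
    rw [List.foldl_nil, show xorRange s (s + 0 * 0) = 0 from by
      unfold xorRange; rw [if_pos (by omega)]]
  · -- positive length: rows on the A side, block-minus-skips on the B side
    have hA : solutionLoop (s + L * L) L 0 0 (L - 1) s = rowsXor s 0 L := by
      have h1 : s + (L.toNat : Int) * L = s + L * L := by
        have : ((L.toNat : Nat) : Int) = L := by omega
        rw [this]
      rw [← h1, loop_rows L.toNat L 0 0 s (by omega), ixor_zero_left]
      norm_num
    have hB : (PySem.List.pyRange 1 L 1).foldl
        (fun checksum c =>
          PySem.Int.bxor checksum
            (xorRange (s + (c + 1) * L - c) (s + (c + 1) * L))) (xorRange s (s + L * L))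
        = Int.xor (xorRange s (s + L * L)) (skipsX s 1 L) :=
      fold_skips (L - 1).toNat s L _ 1 rfl
    rw [hA, hB]
    have hD := rows_decompose L.toNat s 0 L (by omega) (by omega)
    have h0 : s + 0 * L = s := by ring
    have hLL : ((L.toNat : Nat) : Int) * L = L * L := by
      have : ((L.toNat : Nat) : Int) = L := by omega
      rw [this]
    rw [h0, hLL] at hD
    have hsk0 : skipsX s 0 L = skipsX s 1 L := by
      rw [skipsX, if_pos (by omega)]
      have e : s + (0 + 1) * L - 0 = s + (0 + 1) * L := by ring
      rw [e, show xorRange (s + (0 + 1) * L) (s + (0 + 1) * L) = 0 from by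
        unfold xorRange; rw [if_pos (by omega)], ixor_zero_left]
      norm_num
    rw [hD, hsk0, xorRange_spec s (s + L * L) (by omega)]
    congr 2
    omega
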